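-- pv_equiv track=rewrite | github.com/megretj/AdventOfCode2023 | Day11.py | scaleImage
-- ===== SOURCE A (Python) =====
-- import copy
--
-- def scaleImage(image):
--     # First scale empty rows
--     newImage = []
--     emptyRow = ['.' for i in range(len(image[0]))]
--     for i, row in enumerate(image):
--         empty = True
--         for pixel in row:
--             if pixel != '.':
--                 empty = False
--         newImage.append(row[:])
--         if empty:
--             for _ in range(1000000):
--                 newImage.append(emptyRow[:])
--     # Then scale empty columns
--     EmptyCols = []
--     for col in range(len(image[0])):
--         emptyCol = True
--         for row in image:
--             if row[col] != '.':
--                 emptyCol = False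
--         if emptyCol:
--             EmptyCols.append(col)
--     for colId, column in enumerate(EmptyCols):
--         for row in newImage:
--             for i in range(1000000):
--                 row.insert(colId*1000000+column+i,'.')
--     return copy.deepcopy(newImage)
-- ===== SOURCE B (Python) =====
-- def scaleImage(image):
--     width = len(image[0])
--     emptyCols = {c for c in range(width) if all(row[c] == '.' for row in image)}
--
--     def expand(row):
--         out = []
--         for j, px in enumerate(row):
--             if j in emptyCols:
--                 out.extend(['.'] * 1000000)
--             out.append(px)
--         return out
--
--     expandedEmpty = expand(['.'] * width)
--     result = []
--     for row in image:
--         result.append(expand(row))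
--         if all(px == '.' for px in row):
--             result.extend([list(expandedEmpty) for _ in range(1000000)])
--     return result
-- ===== Notes on version B (the rewrite author's own statement) =====
-- stated objective: faster
-- what changed: Replaces A's per-column repeated list.insert passes over every already-expanded row (shifting millions of cells per insert) by one upfront scan for empty rows/columns and a single left-to-right construction of each output row.
import Mathlib
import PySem

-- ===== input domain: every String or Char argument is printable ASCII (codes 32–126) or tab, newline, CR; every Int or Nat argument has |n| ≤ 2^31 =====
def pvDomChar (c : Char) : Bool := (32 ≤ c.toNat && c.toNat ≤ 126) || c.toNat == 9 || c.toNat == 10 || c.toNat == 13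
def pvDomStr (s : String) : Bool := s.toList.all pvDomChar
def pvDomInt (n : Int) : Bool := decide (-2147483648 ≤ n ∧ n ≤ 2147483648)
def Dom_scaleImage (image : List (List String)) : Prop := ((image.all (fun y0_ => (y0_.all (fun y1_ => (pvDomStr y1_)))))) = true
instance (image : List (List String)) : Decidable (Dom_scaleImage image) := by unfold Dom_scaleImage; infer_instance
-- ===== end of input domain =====

-- B precomputes the empty rows/columns once and builds every output row in a single left-to-right
-- pass, instead of A's per-empty-column passes of 10^6 list.insert calls into every expanded row.

-- ===== PORT A =====
def scaleImage (image : List (List String)) : List (List String) :=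
  let width := (image.headD []).length
  let emptyRow := (List.range width).map (fun _ => ".")
  let newImage := image.foldl (fun acc row =>
      let empty := row.foldl (fun e pixel => if pixel != "." then false else e) true
      let acc2 := acc ++ [row]
      if empty then acc2 ++ List.replicate 1000000 emptyRow else acc2) []
  let emptyCols := (List.range width).foldl (fun ec col =>
      let emptyCol := image.foldl (fun e row => if row.getD col "." != "." then false else e) true
      if emptyCol then ec ++ [col] else ec) []
  (PySem.List.enumerate emptyCols 0).foldl (fun rows p =>
      rows.map (fun row => (List.range 1000000).foldl
        (fun s (i : Nat) => PySem.List.insert s (p.1 * 1000000 + (p.2 : Int) + (i : Int)) ".") row)) newImage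

-- ===== PORT B =====
def scaleImage_alt (image : List (List String)) : List (List String) :=
  let width := (image.headD []).length
  let emptyCols := (List.range width).filter (fun c => image.all (fun row => row.getD c "." == "."))
  let expand := fun (row : List String) =>
    (row.zipIdx 0).foldl (fun out pj =>
      out ++ ((if emptyCols.contains pj.2 then List.replicate 1000000 "." else []) ++ [pj.1])) []
  let expandedEmpty := expand (List.replicate width ".")
  image.foldl (fun res row =>
    let res2 := res ++ [expand row]
    if row.all (fun px => px == ".") then res2 ++ List.replicate 1000000 expandedEmpty else res2) []

-- ===== PRECONDITION & SPEC =====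
-- Pre_ excludes exactly the inputs where the Python A raises IndexError: the empty image
-- (image[0]) and images with some row shorter than row 0 (row[col] in the empty-column scan).
def Pre_scaleImage (image : List (List String)) : Prop :=
  image ≠ [] ∧ ∀ row ∈ image, (image.headD []).length ≤ row.length
instance (image : List (List String)) : Decidable (Pre_scaleImage image) := by
  unfold Pre_scaleImage; infer_instance
def pvWitness_scaleImage : List (List String) := [["#", "."], [".", "x"]]

def Spec_scaleImage (image : List (List String)) (out : List (List String)) : Prop := out = scaleImage_alt image
instance (image : List (List String)) (out : List (List String)) : Decidable (Spec_scaleImage image out) := by unfold Spec_scaleImage; infer_instance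

-- ===== CLAIM (what is proved, stated in full; the proofs are below) =====
def Claim_equal_scaleImage : Prop := ∀ (image : List (List String)), Dom_scaleImage image → Pre_scaleImage image → Spec_scaleImage image (scaleImage image)

-- ===== LEMMAS AND PROOFS =====
-- (all lemmas are stated for a generic duplication count m; the ports use m = 10^6)

-- the common row shape: walk the row left to right, inserting m dots before each empty column
def expandSpec (m : Nat) (E : List Nat) : Nat → List String → List String
  | _, [] => []
  | d, px :: r => (if E.contains d then List.replicate m "." else []) ++ px :: expandSpec m E (d+1) r

theorem expandSpec_nil (m d : Nat) (r : List String) : expandSpec m [] d r = r := by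
  induction r generalizing d with
  | nil => rfl
  | cons px r ih => simp [expandSpec, ih]

theorem expandSpec_drop_head (m c : Nat) (E : List Nat) (d : Nat) (r : List String)
    (h : c < d) : expandSpec m (c :: E) d r = expandSpec m E d r := by
  induction r generalizing d with
  | nil => rfl
  | cons px r ih =>
      have hne : d ≠ c := Nat.ne_of_gt h
      simp [expandSpec, List.contains_eq_mem, hne, ih (d+1) (Nat.lt_succ_of_lt h)]

theorem expandSpec_decomp (m : Nat) (u : List String) (px : String) (v : List String) :
    ∀ (d c : Nat) (E : List Nat), u.length = c - d → d ≤ c →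
    (∀ c' ∈ E, c < c') →
    expandSpec m (c :: E) d (u ++ px :: v)
      = u ++ List.replicate m "." ++ px :: expandSpec m E (c+1) v := by
  induction u with
  | nil =>
      intro d c E hu hdc hE
      have hdc' : d = c := by simp at hu; omega
      subst hdc'
      simp only [List.nil_append, expandSpec]
      rw [expandSpec_drop_head m d E (d+1) v (Nat.lt_succ_self d)]
      simp [List.contains_eq_mem]
  | cons a u ih =>
      intro d c E hu hdc hE
      have hlt : d < c := by simp at hu; omega
      have hnot : d ∉ c :: E := by
        intro hmem
        rcases List.mem_cons.1 hmem with h | h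
        · omega
        · exact absurd (hE d h) (by omega)
      simp only [List.cons_append, expandSpec]
      rw [ih (d+1) c E (by simp at hu ⊢; omega) hlt hE]
      simp [List.contains_eq_mem, hnot]

-- Bool shape shared by A's two scan loops
theorem not_any_bne {α : Type} (g : α → String) (l : List α) :
    (!l.any fun x => g x != ".") = l.all fun x => g x == "." := by
  induction l with
  | nil => rfl
  | cons a l ih =>
      simp only [List.any_cons, List.all_cons, Bool.not_or, ih]
      cases h : (g a == ".") <;> simp [bne, h]

theorem emptyFold_eq (row : List String) :
    row.foldl (fun e pixel => if pixel != "." then false else e) true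
      = row.all (fun px => px == ".") := by
  rw [PySem.List.foldl_if_false_eq]
  simpa using not_any_bne (fun px => px) row

theorem emptyColFold_eq (image : List (List String)) (col : Nat) :
    image.foldl (fun e row => if row.getD col "." != "." then false else e) true
      = image.all (fun row => row.getD col "." == ".") := by
  rw [PySem.List.foldl_if_false_eq]
  simpa using not_any_bne (fun row => row.getD col ".") image

-- fold of maps commutes to map of folds
theorem foldl_map_comm {σ τ : Type} (l : List σ) (rows : List τ) (f : σ → τ → τ) :
    l.foldl (fun rows x => rows.map (f x)) rows
      = rows.map (fun r => l.foldl (fun r x => f x r) r) := by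
  induction l generalizing rows with
  | nil => simp
  | cons a l ih => simp only [List.foldl_cons, ih, List.map_map]; rfl

-- the append-then-maybe-duplicate row loop, shared shape of A's and B's row phase
theorem rowsFold {α : Type} (l : List α) (g : α → α) (q : α → Bool) (z : α) (m : Nat) :
    l.foldl (fun acc row => if q row then (acc ++ [g row]) ++ List.replicate m z else acc ++ [g row]) []
      = l.flatMap (fun row => g row :: if q row then List.replicate m z else []) := by
  have hb : ∀ (acc : List α) (row : α),
      (if q row then (acc ++ [g row]) ++ List.replicate m z else acc ++ [g row])
        = acc ++ (g row :: if q row then List.replicate m z else []) := by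
    intro acc row
    by_cases h : q row <;> simp [h]
  simp only [hb]
  rw [PySem.List.foldl_append_eq_flatMap]
  simp

-- the m-fold insert loop of A is one splice
theorem insertLoop (m : Nat) (r : List String) (p : Nat) (hp : p ≤ r.length) :
    (List.range m).foldl (fun s (i : Nat) => PySem.List.insert s ((p : Int) + (i : Int)) ".") r
      = r.take p ++ List.replicate m "." ++ r.drop p := by
  induction m with
  | zero => simp
  | succ m ih =>
      rw [List.range_succ, List.foldl_append, ih]
      simp only [List.foldl_cons, List.foldl_nil]
      have hcast : (p : Int) + (m : Int) = ((p + m : Nat) : Int) := by push_cast; ring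
      have hlen : (r.take p ++ List.replicate m ".").length = p + m := by
        simp [List.length_take]; omega
      rw [hcast, PySem.List.insert_natCast _ _ _ (by simp [List.length_take]; omega)]
      rw [List.take_left' hlen, List.drop_left' hlen, List.replicate_succ']
      simp

-- the whole per-row insert phase of A equals expandSpec
theorem applyCols (m : Nat) (E : List Nat) : ∀ (k d : Nat) (P r : List String),
    E.Pairwise (· < ·) → (∀ c ∈ E, d ≤ c ∧ c - d < r.length) →
    P.length = k * m + d →
    (PySem.List.enumerate E (k : Int)).foldl
      (fun row p => (List.range m).foldl
        (fun s (i : Nat) => PySem.List.insert s (p.1 * (m : Int) + (p.2 : Int) + (i : Int)) ".") row)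
      (P ++ r)
    = P ++ expandSpec m E d r := by
  induction E with
  | nil =>
      intro k d P r _ _ _
      simp [PySem.List.enumerate_nil, expandSpec_nil]
  | cons c E ih =>
      intro k d P r hpw hbound hP
      obtain ⟨hdc, hcr⟩ := hbound c (List.mem_cons_self)
      rw [PySem.List.enumerate_cons]
      simp only [List.foldl_cons]
      have hfun : (fun (s : List String) (i : Nat) =>
            PySem.List.insert s ((k : Int) * (m : Int) + (c : Int) + (i : Int)) ".")
          = fun s (i : Nat) => PySem.List.insert s (((P.length + (c - d) : Nat) : Int) + (i : Int)) "." := by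
        funext s i
        congr 1
        push_cast
        omega
      rw [hfun, insertLoop m (P ++ r) (P.length + (c - d)) (by simp; omega)]
      have hsplit : r.drop (c - d) = r[c - d]'hcr :: r.drop (c - d + 1) :=
        List.drop_eq_getElem_cons hcr
      have htake : (P ++ r).take (P.length + (c - d)) = P ++ r.take (c - d) :=
        List.take_length_add_append _
      have hdrop : (P ++ r).drop (P.length + (c - d)) = r.drop (c - d) :=
        List.drop_length_add_append _
      rw [htake, hdrop, hsplit]
      have hstate : (P ++ r.take (c - d)) ++ List.replicate m "." ++ (r[c - d]'hcr :: r.drop (c - d + 1))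
          = (P ++ (r.take (c - d) ++ List.replicate m "." ++ [r[c - d]'hcr])) ++ r.drop (c - d + 1) := by
        simp [List.append_assoc]
      rw [hstate]
      have hkcast : (k : Int) + 1 = ((k + 1 : Nat) : Int) := by push_cast; ring
      have hmul : (k + 1) * m = k * m + m := by ring
      rw [hkcast, ih (k + 1) (c + 1)
        (P ++ (r.take (c - d) ++ List.replicate m "." ++ [r[c - d]'hcr]))
        (r.drop (c - d + 1))
        (List.pairwise_cons.1 hpw).2
        (by
          intro c' hc'
          have h1 : c < c' := (List.pairwise_cons.1 hpw).1 c' hc'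
          have h2 := (hbound c' (List.mem_cons_of_mem _ hc')).2
          refine ⟨by omega, ?_⟩
          simp only [List.length_drop]
          omega)
        (by
          simp [List.length_take]
          omega)]
      have hr : r = r.take (c - d) ++ (r[c - d]'hcr :: r.drop (c - d + 1)) := by
        conv_lhs => rw [← List.take_append_drop (c - d) r]
        rw [hsplit]
      have hdec := expandSpec_decomp m (r.take (c - d)) (r[c - d]'hcr) (r.drop (c - d + 1))
        d c E (by simp [List.length_take]; omega) hdc (List.pairwise_cons.1 hpw).1
      rw [← hr] at hdec
      rw [hdec]
      simp [List.append_assoc]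

-- B's expand loop equals expandSpec
theorem expandB (m : Nat) (E : List Nat) (r : List String) : ∀ (d : Nat) (acc : List String),
    (r.zipIdx d).foldl (fun out pj =>
      out ++ ((if E.contains pj.2 then List.replicate m "." else []) ++ [pj.1])) acc
      = acc ++ expandSpec m E d r := by
  induction r with
  | nil => intro d acc; simp [expandSpec]
  | cons px r ih =>
      intro d acc
      simp only [List.zipIdx_cons, List.foldl_cons, ih, expandSpec]
      simp

-- ===== VERDICT (by name: the statement is the Claim_ definition above) =====
theorem scaleImage_spec : Claim_equal_scaleImage := by
  intro image _ hpre
  obtain ⟨hne, hlen⟩ := hpre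
  unfold Spec_scaleImage scaleImage scaleImage_alt
  simp only [emptyColFold_eq, emptyFold_eq]
  rw [PySem.List.foldl_append_if_eq_filter]
  simp only [List.nil_append]
  rw [show (1000000 : Int) = ((1000000 : Nat) : Int) by norm_num]
  generalize (1000000 : Nat) = M
  set w := (image.headD []).length with hw
  set Ee := (List.range w).filter (fun c => image.all fun row => row.getD c "." == ".") with hEdef
  have hEp : Ee.Pairwise (· < ·) := List.Pairwise.filter _ List.pairwise_lt_range
  have hEmem : ∀ c ∈ Ee, c < w := by
    intro c hc
    exact List.mem_range.1 (List.mem_of_mem_filter hc)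
  have hF : ∀ r : List String, w ≤ r.length →
      List.foldl (fun r (p : Int × Nat) => List.foldl
          (fun s (i : Nat) => PySem.List.insert s (p.1 * (M : Int) + (p.2 : Int) + (i : Int)) ".") r
          (List.range M)) r (PySem.List.enumerate Ee 0)
        = expandSpec M Ee 0 r := by
    intro r hrlen
    have := applyCols M Ee 0 0 [] r hEp
      (fun c hc => ⟨Nat.zero_le _, by have := hEmem c hc; omega⟩) (by simp)
    simpa using this
  have hExp : ∀ r : List String,
      List.foldl (fun out (pj : String × Nat) =>
        out ++ ((if Ee.contains pj.2 then List.replicate M "." else []) ++ [pj.1])) [] (r.zipIdx 0)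
        = expandSpec M Ee 0 r := by
    intro r
    simpa using expandB M Ee r 0 []
  rw [rowsFold, rowsFold, foldl_map_comm, List.map_flatMap, List.flatMap_def, List.flatMap_def]
  refine congrArg List.flatten (List.map_congr_left ?_)
  intro row hrow
  have h1 := hF row (hlen row hrow)
  have h2 := hExp row
  have h3 := hF (List.replicate w ".") (by simp)
  have h4 := hExp (List.replicate w ".")
  by_cases hq : (row.all fun px => px == ".") = true
  · rw [if_pos hq, if_pos hq]
    simp only [List.map_cons, List.map_replicate, List.map_const', List.length_range,
      h1, h2, h3, h4]
  · rw [if_neg hq, if_neg hq]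
    simp only [List.map_cons, List.map_nil, h1, h2]
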